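-- pv_equiv track=rewrite | github.com/Hariwo711/Ai_Builders_2024 | 03 Letter Count I/main.py | LetterCountI
-- ===== SOURCE A (Python) =====
-- def LetterCountI(strParam):
--   word_list = strParam.split()
--   answer = "-1"
--   max_char = 0
--   longest = {}
--   for word in word_list:
--     word_dict = {}
--     for letter in word:
--       if letter in word_dict:
--         word_dict[letter]+=1
--       else:
--         word_dict[letter] = 1
--       max_char = max(word_dict.values())
--     longest[word]=max_char
--   for i in range(len(word_list)):
--     if max(longest.values()) != longest[word_list[i]]:
--       answer = "-1"
--     elif max(longest.values())>1:
--       answer = word_list[i]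
--       break
--     else:
--       break
--
--   return answer
-- ===== SOURCE B (Python) =====
-- def LetterCountI(strParam):
--   best_word = "-1"
--   best_count = 1
--   for word in strParam.split():
--     counts = {}
--     for ch in word:
--       counts[ch] = counts.get(ch, 0) + 1
--     wmax = max(counts.values())
--     if wmax > best_count:
--       best_word = word
--       best_count = wmax
--   return best_word
-- ===== Notes on version B (the rewrite author's own statement) =====
-- stated objective: faster
-- what changed: Single pass keeping a running best word and best count (strict > against an initial count of 1) instead of building a word->max-frequency table, rescanning the word list, and recomputing max(longest.values()) on every rescan iteration.
import Mathlib
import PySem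

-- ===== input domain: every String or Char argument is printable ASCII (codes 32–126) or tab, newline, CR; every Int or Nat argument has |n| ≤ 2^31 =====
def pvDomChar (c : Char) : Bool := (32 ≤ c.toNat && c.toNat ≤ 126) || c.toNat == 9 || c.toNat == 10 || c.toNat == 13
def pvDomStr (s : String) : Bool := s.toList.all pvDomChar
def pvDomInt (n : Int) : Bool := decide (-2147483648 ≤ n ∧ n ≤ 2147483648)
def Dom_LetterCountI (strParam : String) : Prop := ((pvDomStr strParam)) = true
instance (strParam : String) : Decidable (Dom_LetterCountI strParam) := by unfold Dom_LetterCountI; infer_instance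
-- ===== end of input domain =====

-- B replaces A's word->max-letter-frequency table and its rescan (with repeated max(longest.values()))
-- by one pass keeping a running best word/best count (no rescan, no repeated max()); measured faster.

-- ===== PORT A =====
-- A-side helper: A's second loop 'for i in range(len(word_list)): … break' as recursion over the range list
def LetterCountI_loop (word_list : List String) (longest : PySem.Dict String Int) :
    List Int → String → String
  | [], answer => answer
  | i :: rest, answer =>
    -- max(longest.values()): whenever this body runs, word_list (hence longest) is nonempty, so the .getD 0 default is unreachable
    let m := (PySem.List.max? longest.values (fun x => x)).getD 0
    if m ≠ longest.getD (PySem.List.pyGetD word_list i "") 0 then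
      LetterCountI_loop word_list longest rest "-1"
    else if m > 1 then PySem.List.pyGetD word_list i ""
    else answer

def LetterCountI (strParam : String) : String :=
  let word_list := PySem.Str.split₀ strParam
  -- first loop: state = (max_char, longest); inner loop: state = (max_char, word_dict)
  let st := word_list.foldl (fun (st : Int × PySem.Dict String Int) word =>
      let inner := word.toList.foldl (fun (st2 : Int × PySem.Dict Char Int) letter =>
          let word_dict := if st2.2.contains letter then st2.2.modify letter 0 (· + 1)
                           else st2.2.insert letter 1
          -- max(word_dict.values()): word_dict just received `letter`, so it is nonempty and the default is unreachable
          ((PySem.List.max? word_dict.values (fun x => x)).getD 0, word_dict))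
        (st.1, PySem.Dict.empty)
      (inner.1, st.2.insert word inner.1))
    (0, PySem.Dict.empty)
  LetterCountI_loop word_list st.2 (PySem.List.pyRange 0 word_list.length 1) "-1"

-- ===== PORT B =====
def LetterCountI_alt (strParam : String) : String :=
  ((PySem.Str.split₀ strParam).foldl (fun (st : String × Int) word =>
      let counts := word.toList.foldl (fun d ch => d.insert ch (d.getD ch 0 + 1))
        (PySem.Dict.empty : PySem.Dict Char Int)
      -- max(counts.values()): every word .split() yields is nonempty, so counts is nonempty and the default is unreachable
      let wmax := (PySem.List.max? counts.values (fun x => x)).getD 0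
      if wmax > st.2 then (word, wmax) else st)
    ("-1", 1)).1

-- ===== PRECONDITION & SPEC =====
def Spec_LetterCountI (strParam : String) (out : String) : Prop := out = LetterCountI_alt strParam
instance (strParam : String) (out : String) : Decidable (Spec_LetterCountI strParam out) := by unfold Spec_LetterCountI; infer_instance

-- ===== CLAIM (what is proved, stated in full; the proofs are below) =====
def Claim_equal_LetterCountI : Prop := ∀ (strParam : String), Dom_LetterCountI strParam → Spec_LetterCountI strParam (LetterCountI strParam)

-- ===== LEMMAS AND PROOFS =====

-- the per-word value both programs compute: max letter multiplicity of the word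
def wordMax (w : String) : Int :=
  (PySem.List.max? (PySem.Dict.counter w.toList).values (fun x => x)).getD 0

-- running max of wordMax over a list of words, from an initial value
def runMax (ws : List String) (c : Int) : Int :=
  ws.foldl (fun a w => max a (wordMax w)) c

-- ---------- words produced by split() are nonempty ----------
lemma split₀_go_ne_nil (rest : List Char) : ∀ (cur : List Char) (acc : List (List Char)),
    (∀ x ∈ acc, x ≠ []) → ∀ w ∈ PySem.Chars.split₀.go rest cur acc, w ≠ [] := by
  induction rest with
  | nil =>
    intro cur acc hacc w hw
    unfold PySem.Chars.split₀.go at hw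
    by_cases hc : cur.isEmpty
    · simp [hc] at hw
      exact hacc _ (by simpa using hw)
    · simp [hc] at hw
      rcases hw with h | h
      · exact hacc _ h
      · subst h
        simp [List.isEmpty_iff] at hc
        simpa using hc
  | cons c rest ih =>
    intro cur acc hacc w hw
    unfold PySem.Chars.split₀.go at hw
    by_cases hs : PySem.Chars.isspace c
    · by_cases hc : cur.isEmpty
      · simp [hs, hc] at hw
        exact ih [] acc hacc w hw
      · simp [hs, hc] at hw
        refine ih [] (cur.reverse :: acc) ?_ w hw
        intro x hx
        rcases List.mem_cons.mp hx with hx | hx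
        · subst hx
          simp [List.isEmpty_iff] at hc
          simpa using hc
        · exact hacc _ hx
    · simp [hs] at hw
      exact ih (c :: cur) acc hacc w hw

lemma split₀_word_ne (s : String) : ∀ w ∈ PySem.Str.split₀ s, w ≠ "" := by
  intro w hw hcontra
  have h1 : w.toList ∈ List.map String.toList (PySem.Str.split₀ s) := List.mem_map_of_mem hw
  rw [PySem.Str.split₀_map_toList] at h1
  have := split₀_go_ne_nil s.toList [] [] (by simp) w.toList h1
  apply this
  rw [hcontra]
  rfl

-- ---------- A's inner counting step = B's counting step ----------
lemma step_eq (d : PySem.Dict Char Int) (c : Char) :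
    (if d.contains c then d.modify c 0 (· + 1) else d.insert c 1) = d.insert c (d.getD c 0 + 1) := by
  by_cases h : d.contains c
  · simp [h, PySem.Dict.modify]
  · simp [h, PySem.Dict.getD_of_not_contains d 0 (by simpa using h)]

-- ---------- A's inner loop computes (wordMax w, counter w) for nonempty w ----------
lemma innerA (l : List Char) (hl : l ≠ []) : ∀ (mc0 : Int) (d0 : PySem.Dict Char Int),
    l.foldl (fun (st2 : Int × PySem.Dict Char Int) letter =>
        ((PySem.List.max? (if st2.2.contains letter then st2.2.modify letter 0 (· + 1)
                           else st2.2.insert letter 1).values (fun x => x)).getD 0,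
         if st2.2.contains letter then st2.2.modify letter 0 (· + 1)
         else st2.2.insert letter 1)) (mc0, d0)
      = (((PySem.List.max? (l.foldl (fun d x => d.insert x (d.getD x 0 + 1)) d0).values (fun x => x)).getD 0),
         l.foldl (fun d x => d.insert x (d.getD x 0 + 1)) d0) := by
  induction l with
  | nil => exact absurd rfl hl
  | cons c rest ih =>
    intro mc0 d0
    by_cases hr : rest = []
    · subst hr
      simp [step_eq]
    · simp only [List.foldl_cons]
      rw [step_eq]
      exact ih hr _ _

-- ---------- A's first loop: longest = fold of inserts of wordMax ----------
lemma outerA (ws : List String) (hne : ∀ w ∈ ws, w ≠ "") :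
    ∀ (mc0 : Int) (d0 : PySem.Dict String Int),
    (ws.foldl (fun (st : Int × PySem.Dict String Int) word =>
        ((word.toList.foldl (fun (st2 : Int × PySem.Dict Char Int) letter =>
            ((PySem.List.max? (if st2.2.contains letter then st2.2.modify letter 0 (· + 1)
                               else st2.2.insert letter 1).values (fun x => x)).getD 0,
             if st2.2.contains letter then st2.2.modify letter 0 (· + 1)
             else st2.2.insert letter 1))
          (st.1, PySem.Dict.empty)).1,
         st.2.insert word (word.toList.foldl (fun (st2 : Int × PySem.Dict Char Int) letter =>
            ((PySem.List.max? (if st2.2.contains letter then st2.2.modify letter 0 (· + 1)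
                               else st2.2.insert letter 1).values (fun x => x)).getD 0,
             if st2.2.contains letter then st2.2.modify letter 0 (· + 1)
             else st2.2.insert letter 1))
          (st.1, PySem.Dict.empty)).1)) (mc0, d0)).2
      = ws.foldl (fun d w => d.insert w (wordMax w)) d0 := by
  induction ws with
  | nil => intro mc0 d0; rfl
  | cons w ws ih =>
    intro mc0 d0
    have hw : w.toList ≠ [] := by
      intro h
      apply hne w (by simp)
      cases w using String.rec with
      | _ l => simpa using h
    simp only [List.foldl_cons]
    rw [innerA w.toList hw]
    rw [PySem.Dict.foldl_insert_getD_add_one_eq_counter]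
    exact ih (fun x hx => hne x (by simp [hx])) _ _

-- ---------- lookup in the longest table ----------
lemma getD_foldl_not_mem (ws : List String) (w : String) (hw : w ∉ ws) :
    ∀ (d0 : PySem.Dict String Int),
    (ws.foldl (fun d w => d.insert w (wordMax w)) d0).getD w 0 = d0.getD w 0 := by
  induction ws with
  | nil => intro d0; rfl
  | cons x ws ih =>
    intro d0
    simp only [List.foldl_cons]
    rw [ih (fun h => hw (by simp [h]))]
    exact PySem.Dict.getD_insert_of_ne _ _ _ (fun h => hw (by simp [h]))

lemma getD_longest (ws : List String) (w : String) (hw : w ∈ ws) : ∀ (d0 : PySem.Dict String Int),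
    (ws.foldl (fun d w => d.insert w (wordMax w)) d0).getD w 0 = wordMax w := by
  induction ws with
  | nil => cases hw
  | cons x ws ih =>
    intro d0
    simp only [List.foldl_cons]
    by_cases h : w ∈ ws
    · exact ih h _
    · have hwx : w = x := by
        rcases List.mem_cons.mp hw with h' | h'
        · exact h'
        · exact absurd h' h
      subst hwx
      rw [getD_foldl_not_mem ws w h]
      exact PySem.Dict.getD_insert_self _ _ _ _

-- values of the longest table are wordMax of members, and every member's wordMax is a value
lemma values_longest (ws : List String) :
    (ws.foldl (fun d w => d.insert w (wordMax w)) PySem.Dict.empty).values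
      = (PySem.Set.ofList ws).map (fun w => wordMax w) := by
  have hk : (ws.foldl (fun d w => d.insert w (wordMax w)) PySem.Dict.empty).keys
      = PySem.Set.ofList ws := by
    rw [PySem.Dict.keys_foldl_insert]
    simp [PySem.Set.update, PySem.Set.ofList_eq_foldl]
  have hnd : (ws.foldl (fun d w => d.insert w (wordMax w)) PySem.Dict.empty).keys.Nodup := by
    rw [hk]; exact PySem.Set.nodup_ofList ws
  rw [PySem.Dict.values_eq_map_keys _ hnd 0, hk]
  apply List.map_congr_left
  intro k hk'
  exact getD_longest ws k ((PySem.Set.mem_ofList _ _).mp hk') _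

-- ---------- A's second loop over the range list = scan over the word list ----------
def scanA (longest : PySem.Dict String Int) (m : Int) : List String → String → String
  | [], answer => answer
  | w :: rest, answer =>
    if m ≠ longest.getD w 0 then scanA longest m rest "-1"
    else if m > 1 then w
    else answer

lemma loop_eq_scan (ws : List String) (longest : PySem.Dict String Int) :
    ∀ (t : List String) (k : Nat), ws.drop k = t → ∀ answer,
    LetterCountI_loop ws longest (PySem.List.pyRange (k : Int) (ws.length : Int) 1) answer
      = scanA longest ((PySem.List.max? longest.values (fun x => x)).getD 0) t answer := by
  intro t
  induction t with
  | nil =>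
    intro k hk answer
    have hlen : ws.length ≤ k := by
      by_contra h
      push_neg at h
      have := List.length_drop (l := ws) (i := k)
      rw [hk] at this
      simp at this
      omega
    rw [PySem.List.pyRange_one_eq_nil (by exact_mod_cast hlen)]
    rfl
  | cons w t ih =>
    intro k hk answer
    have hklt : k < ws.length := by
      by_contra h
      push_neg at h
      rw [List.drop_eq_nil_of_le h] at hk
      cases hk
    have hget : PySem.List.pyGetD ws (k : Int) "" = w := by
      rw [PySem.List.pyGetD_eq_getElem ws "" (Int.natCast_nonneg k) (by exact_mod_cast hklt)]
      have h0 : ws[(k:Int).toNat]? = some w := by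
        have h1 := List.getElem?_drop (xs := ws) (i := k) (j := 0)
        rw [hk] at h1
        simpa using h1.symm
      have h2 : ws[(k:Int).toNat] = w := by
        rw [List.getElem?_eq_getElem (by simpa using hklt)] at h0
        exact Option.some_injective _ h0
      simpa using h2
    rw [PySem.List.pyRange_one_cons (by exact_mod_cast hklt)]
    rw [LetterCountI_loop]
    rw [hget]
    have hdrop : ws.drop (k + 1) = t := by
      have h2 := List.drop_drop (l := ws) (i := 1) (j := k)
      rw [← h2, hk]
      rfl
    have hrec := ih (k + 1) hdrop
    push_cast at hrec
    show _ = scanA longest _ (w :: t) answer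
    unfold scanA
    split_ifs with h1 h2
    · exact hrec "-1"
    · rfl
    · rfl

-- ---------- B's fold characterisation ----------
lemma le_runMax (ws : List String) (c : Int) : c ≤ runMax ws c :=
  (PySem.List.le_foldl_max_int ws (fun w => wordMax w) c).1

lemma mem_le_runMax (ws : List String) (c : Int) (w : String) (hw : w ∈ ws) :
    wordMax w ≤ runMax ws c :=
  (PySem.List.le_foldl_max_int ws (fun w => wordMax w) c).2 w hw

lemma runMax_attain (ws : List String) : ∀ c, runMax ws c = c ∨ ∃ w ∈ ws, wordMax w = runMax ws c := by
  induction ws with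
  | nil => intro c; left; rfl
  | cons w ws ih =>
    intro c
    have hstep : runMax (w :: ws) c = runMax ws (max c (wordMax w)) := rfl
    rcases ih (max c (wordMax w)) with h | ⟨u, hu, he⟩
    · by_cases hc : wordMax w ≤ c
      · left; rw [hstep, h, max_eq_left hc]
      · right
        refine ⟨w, by simp, ?_⟩
        rw [hstep, h, max_eq_right ((not_le.mp hc).le)]
    · right
      exact ⟨u, by simp [hu], by rw [hstep, ← he]⟩

lemma find?_getD_of_attain (ws : List String) (M : Int) (b b' : String)
    (h : ∃ u ∈ ws, wordMax u = M) :
    (ws.find? (fun w => wordMax w == M)).getD b = (ws.find? (fun w => wordMax w == M)).getD b' := by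
  obtain ⟨u, hu, he⟩ := h
  have hs : (ws.find? (fun w => wordMax w == M)).isSome :=
    List.find?_isSome.mpr ⟨u, hu, by simp [he]⟩
  obtain ⟨v, hv⟩ := Option.isSome_iff_exists.mp hs
  simp [hv]

lemma foldB_eq (ws : List String) : ∀ (b : String) (c : Int),
    ws.foldl (fun (st : String × Int) w => if wordMax w > st.2 then (w, wordMax w) else st) (b, c)
      = ((if runMax ws c > c then (ws.find? (fun w => wordMax w == runMax ws c)).getD b else b),
          runMax ws c) := by
  induction ws with
  | nil => intro b c; simp [runMax]
  | cons w ws ih =>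
    intro b c
    have hstep : runMax (w :: ws) c = runMax ws (max c (wordMax w)) := rfl
    simp only [List.foldl_cons]
    by_cases hwc : wordMax w > c
    · rw [if_pos hwc, ih w (wordMax w)]
      have hmx : max c (wordMax w) = wordMax w := max_eq_right (le_of_lt hwc)
      rw [hstep, hmx]
      have hMw : wordMax w ≤ runMax ws (wordMax w) := le_runMax _ _
      have hMc : runMax ws (wordMax w) > c := lt_of_lt_of_le hwc hMw
      rw [if_pos hMc]
      by_cases hgt : runMax ws (wordMax w) > wordMax w
      · rw [if_pos hgt]
        have hne : (wordMax w == runMax ws (wordMax w)) = false := by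
          simp only [beq_eq_false_iff_ne, ne_eq]
          omega
        rw [List.find?_cons_of_neg (p := fun u => wordMax u == runMax ws (wordMax w)) (a := w) (by simp only [hne]; exact Bool.false_ne_true)]
        have hat : ∃ u ∈ ws, wordMax u = runMax ws (wordMax w) := by
          rcases runMax_attain ws (wordMax w) with h | h
          · omega
          · exact h
        rw [find?_getD_of_attain ws _ w b hat]
      · rw [if_neg hgt]
        have heq : runMax ws (wordMax w) = wordMax w := le_antisymm (not_lt.mp hgt) hMw
        have hp : (wordMax w == runMax ws (wordMax w)) = true := by simp [heq]
        rw [List.find?_cons_of_pos (p := fun u => wordMax u == runMax ws (wordMax w)) (a := w) hp]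
        rfl
    · rw [if_neg hwc, ih b c]
      have hmx : max c (wordMax w) = c := max_eq_left (not_lt.mp hwc)
      rw [hstep, hmx]
      by_cases hM : runMax ws c > c
      · rw [if_pos hM, if_pos hM]
        have hne : (wordMax w == runMax ws c) = false := by
          simp only [beq_eq_false_iff_ne, ne_eq]
          have := not_lt.mp hwc
          omega
        rw [List.find?_cons_of_neg (p := fun u => wordMax u == runMax ws c) (a := w) (by simp only [hne]; exact Bool.false_ne_true)]
      · rw [if_neg hM, if_neg hM]

-- ---------- scanA characterisation ----------
lemma scanA_eq (longest : PySem.Dict String Int) (m : Int) : ∀ (t : List String),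
    scanA longest m t "-1"
      = match t.find? (fun w => longest.getD w 0 == m) with
        | some w => if m > 1 then w else "-1"
        | none => "-1" := by
  intro t
  induction t with
  | nil => rfl
  | cons w t ih =>
    by_cases h : m = longest.getD w 0
    · have hp : (longest.getD w 0 == m) = true := by simp [h]
      rw [List.find?_cons_of_pos (p := fun u => longest.getD u 0 == m) (a := w) hp]
      show (if m ≠ longest.getD w 0 then _ else _) = _
      rw [if_neg (by simpa using h)]
    · have hp : (longest.getD w 0 == m) = false := by simp [Ne.symm h]
      rw [List.find?_cons_of_neg (p := fun u => longest.getD u 0 == m) (a := w) (by simp only [hp]; exact Bool.false_ne_true)]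
      show (if m ≠ longest.getD w 0 then _ else _) = _
      rw [if_pos h]
      exact ih

lemma find?_congr_mem {l : List String} {p q : String → Bool} (h : ∀ x ∈ l, p x = q x) :
    l.find? p = l.find? q := by
  induction l with
  | nil => rfl
  | cons x t ih =>
    have hx := h x (by simp)
    by_cases hp : p x
    · rw [List.find?_cons_of_pos (p := p) (a := x) hp, List.find?_cons_of_pos (p := q) (a := x) (hx ▸ hp)]
    · rw [List.find?_cons_of_neg (p := p) (a := x) (by simpa using hp),
         List.find?_cons_of_neg (p := q) (a := x) (by rw [← hx]; simpa using hp)]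
      exact ih (fun x hx => h x (by simp [hx]))

-- the two characterisations agree
lemma combine (ws : List String) :
    (match ws.find? (fun w => wordMax w ==
        (PySem.List.max? (ws.foldl (fun d w => d.insert w (wordMax w)) PySem.Dict.empty).values
          (fun x => x)).getD 0) with
      | some w => if (PySem.List.max? (ws.foldl (fun d w => d.insert w (wordMax w)) PySem.Dict.empty).values
          (fun x => x)).getD 0 > 1 then w else "-1"
      | none => "-1")
    = (if runMax ws 1 > 1 then (ws.find? (fun w => wordMax w == runMax ws 1)).getD "-1" else "-1") := by
  by_cases hws : ws = []
  · subst hws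
    simp [runMax]
  · obtain ⟨w0, hw0⟩ := List.exists_mem_of_ne_nil ws hws
    have hvals := values_longest ws
    have hvne : (ws.foldl (fun d w => d.insert w (wordMax w)) PySem.Dict.empty).values ≠ [] := by
      rw [hvals]
      intro h
      have : w0 ∈ PySem.Set.ofList ws := (PySem.Set.mem_ofList ws w0).mpr hw0
      have : wordMax w0 ∈ (PySem.Set.ofList ws).map (fun w => wordMax w) := List.mem_map_of_mem this
      rw [h] at this
      cases this
    obtain ⟨mA, hmA⟩ : ∃ mA, PySem.List.max?
        (ws.foldl (fun d w => d.insert w (wordMax w)) PySem.Dict.empty).values (fun x => x) = some mA := by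
      cases h : PySem.List.max?
          (ws.foldl (fun d w => d.insert w (wordMax w)) PySem.Dict.empty).values (fun x => x) with
      | none => exact absurd ((PySem.List.max?_eq_none_iff _ _).mp h) hvne
      | some m => exact ⟨m, rfl⟩
    rw [hmA]
    simp only [Option.getD_some]
    obtain ⟨u, hu, humA⟩ : ∃ u ∈ ws, wordMax u = mA := by
      have hm := PySem.List.max?_mem hmA
      rw [hvals] at hm
      obtain ⟨u, hu, he⟩ := List.mem_map.mp hm
      exact ⟨u, (PySem.Set.mem_ofList ws u).mp hu, he⟩
    have hle : ∀ v ∈ ws, wordMax v ≤ mA := by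
      intro v hv
      have : wordMax v ∈ (ws.foldl (fun d w => d.insert w (wordMax w)) PySem.Dict.empty).values := by
        rw [hvals]
        exact List.mem_map_of_mem ((PySem.Set.mem_ofList ws v).mpr hv)
      simpa using PySem.List.max?_isMax hmA _ this
    by_cases hM1 : runMax ws 1 > 1
    · obtain ⟨v, hv, hvM⟩ : ∃ v ∈ ws, wordMax v = runMax ws 1 := by
        rcases runMax_attain ws 1 with h | h
        · omega
        · exact h
      have heq : mA = runMax ws 1 := by
        have h1 : mA ≤ runMax ws 1 := humA ▸ mem_le_runMax ws 1 u hu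
        have h2 : runMax ws 1 ≤ mA := hvM ▸ hle v hv
        omega
      rw [heq, if_pos hM1]
      have hs : (ws.find? (fun w => wordMax w == runMax ws 1)).isSome :=
        List.find?_isSome.mpr ⟨v, hv, by simp [hvM]⟩
      obtain ⟨r, hr⟩ := Option.isSome_iff_exists.mp hs
      rw [hr]
      simp [hM1]
    · rw [if_neg hM1]
      have hmA1 : ¬ mA > 1 := by
        have h1 : mA ≤ runMax ws 1 := humA ▸ mem_le_runMax ws 1 u hu
        omega
      cases hf : ws.find? (fun w => wordMax w == mA) with
      | none => rfl
      | some r => simp [hmA1]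

theorem LetterCountI_spec : Claim_equal_LetterCountI := by
  unfold Claim_equal_LetterCountI
  intro s _
  unfold Spec_LetterCountI
  have hne := split₀_word_ne s
  -- A's side: table + rescan = scanA, then its find? characterisation
  have hA : LetterCountI s = scanA
      ((PySem.Str.split₀ s).foldl (fun d w => d.insert w (wordMax w)) PySem.Dict.empty)
      ((PySem.List.max? ((PySem.Str.split₀ s).foldl (fun d w => d.insert w (wordMax w))
          PySem.Dict.empty).values (fun x => x)).getD 0)
      (PySem.Str.split₀ s) "-1" := by
    simp only [LetterCountI]
    rw [outerA (PySem.Str.split₀ s) hne 0 PySem.Dict.empty]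
    have h := loop_eq_scan (PySem.Str.split₀ s)
      ((PySem.Str.split₀ s).foldl (fun d w => d.insert w (wordMax w)) PySem.Dict.empty)
      (PySem.Str.split₀ s) 0 rfl "-1"
    simpa using h
  -- B's side: the single pass = foldB characterisation
  have hB : LetterCountI_alt s =
      (if runMax (PySem.Str.split₀ s) 1 > 1 then
        ((PySem.Str.split₀ s).find? (fun w => wordMax w == runMax (PySem.Str.split₀ s) 1)).getD "-1"
       else "-1") := by
    simp only [LetterCountI_alt]
    rw [show (fun (st : String × Int) (word : String) =>
        if (PySem.List.max? (word.toList.foldl (fun d ch => d.insert ch (d.getD ch 0 + 1))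
              (PySem.Dict.empty : PySem.Dict Char Int)).values (fun x => x)).getD 0 > st.2
        then (word, (PySem.List.max? (word.toList.foldl (fun d ch => d.insert ch (d.getD ch 0 + 1))
              (PySem.Dict.empty : PySem.Dict Char Int)).values (fun x => x)).getD 0)
        else st)
      = (fun (st : String × Int) w => if wordMax w > st.2 then (w, wordMax w) else st) from by
        funext st word
        rw [PySem.Dict.foldl_insert_getD_add_one_eq_counter]
        rfl]
    rw [foldB_eq]
  rw [hA, hB, scanA_eq]
  rw [find?_congr_mem (q := fun w => wordMax w ==
      (PySem.List.max? ((PySem.Str.split₀ s).foldl (fun d w => d.insert w (wordMax w))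
        PySem.Dict.empty).values (fun x => x)).getD 0)
    (fun w hw => by rw [getD_longest (PySem.Str.split₀ s) w hw])]
  exact combine (PySem.Str.split₀ s)
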